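-- pv_equiv track=rewrite | github.com/Siavashghaffari/Code_review_assistant | src/code_review_automation/analyzers/core_analyzer.py | _calculate_file_metrics
-- ===== SOURCE A (Python) =====
-- from typing import Dict, List, Any, Optional, Set, Tuple
--
-- def _calculate_file_metrics(content: str, ast_tree: Any) -> Dict[str, Any]:
--     """Calculate file-level metrics."""
--     lines = content.split('\n')
--
--     return {
--         'total_lines': len(lines),
--         'code_lines': len([line for line in lines if line.strip() and not line.strip().startswith('#')]),
--         'comment_lines': len([line for line in lines if line.strip().startswith('#')]),
--         'blank_lines': len([line for line in lines if not line.strip()]),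
--         'file_size_bytes': len(content.encode('utf-8')),
--     }
-- ===== SOURCE B (Python) =====
-- def _calculate_file_metrics(content: str, ast_tree) -> dict:
--     """Calculate file-level metrics in a single pass over the lines."""
--     lines = content.split('\n')
--     code = comment = blank = 0
--     for line in lines:
--         s = line.strip()
--         if not s:
--             blank += 1
--         elif s.startswith('#'):
--             comment += 1
--         else:
--             code += 1
--     return {
--         'total_lines': len(lines),
--         'code_lines': code,
--         'comment_lines': comment,
--         'blank_lines': blank,
--         'file_size_bytes': len(content.encode('utf-8')),
--     }
-- ===== Notes on version B (the rewrite author's own statement) =====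
-- stated objective: simpler
-- what changed: Replaces four separate filtering passes over the line list (each re-stripping every line) with one loop that strips each line once and increments a code/comment/blank counter.
import Mathlib
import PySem

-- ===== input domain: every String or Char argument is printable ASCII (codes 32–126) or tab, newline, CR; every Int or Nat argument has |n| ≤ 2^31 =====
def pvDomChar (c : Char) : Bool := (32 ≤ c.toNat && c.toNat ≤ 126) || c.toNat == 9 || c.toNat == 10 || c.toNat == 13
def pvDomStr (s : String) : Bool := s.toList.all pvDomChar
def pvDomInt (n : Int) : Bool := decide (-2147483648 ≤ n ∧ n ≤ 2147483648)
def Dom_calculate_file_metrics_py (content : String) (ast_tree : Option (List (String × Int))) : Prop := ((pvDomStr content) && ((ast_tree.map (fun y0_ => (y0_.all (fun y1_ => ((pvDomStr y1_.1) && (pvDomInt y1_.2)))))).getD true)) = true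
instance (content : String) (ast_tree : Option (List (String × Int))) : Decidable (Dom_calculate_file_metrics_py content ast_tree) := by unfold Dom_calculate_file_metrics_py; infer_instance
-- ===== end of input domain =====

-- B is a single pass over the lines with three counters instead of A's four filtering passes (simpler).
-- On the ASCII/tab/newline/CR domain len(content.encode('utf-8')) equals PySem.Str.len content (exact there).

-- ===== PORT A =====
def calculate_file_metrics_py (content : String) (ast_tree : Option (List (String × Int))) : List (String × Int) :=
  let lines : List String := (PySem.Str.split? content "\n").getD []
  [("total_lines", (lines.length : Int)),
   ("code_lines", ((lines.filter (fun line =>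
      PySem.Str.strip line ≠ "" ∧ ¬ (PySem.Str.startswith (PySem.Str.strip line) "#" = true))).length : Int)),
   ("comment_lines", ((lines.filter (fun line =>
      PySem.Str.startswith (PySem.Str.strip line) "#" = true)).length : Int)),
   ("blank_lines", ((lines.filter (fun line => PySem.Str.strip line = "")).length : Int)),
   ("file_size_bytes", (PySem.Str.len content : Int))]

-- ===== PORT B =====
def countLines_alt : List String → Int → Int → Int → Int × Int × Int
  | [], code, comment, blank => (code, comment, blank)
  | line :: rest, code, comment, blank =>
    let s := PySem.Str.strip line
    if s = "" then countLines_alt rest code comment (blank + 1)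
    else if PySem.Str.startswith s "#" then countLines_alt rest code (comment + 1) blank
    else countLines_alt rest (code + 1) comment blank

def calculate_file_metrics_py_alt (content : String) (ast_tree : Option (List (String × Int))) : List (String × Int) :=
  let lines : List String := (PySem.Str.split? content "\n").getD []
  let c := countLines_alt lines 0 0 0
  [("total_lines", (lines.length : Int)),
   ("code_lines", c.1),
   ("comment_lines", c.2.1),
   ("blank_lines", c.2.2),
   ("file_size_bytes", (PySem.Str.len content : Int))]

-- ===== PRECONDITION & SPEC =====
def Spec_calculate_file_metrics_py (content : String) (ast_tree : Option (List (String × Int))) (out : List (String × Int)) : Prop := out = calculate_file_metrics_py_alt content ast_tree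
instance (content : String) (ast_tree : Option (List (String × Int))) (out : List (String × Int)) : Decidable (Spec_calculate_file_metrics_py content ast_tree out) := by unfold Spec_calculate_file_metrics_py; infer_instance

-- ===== CLAIM (what is proved, stated in full; the proofs are below) =====
def Claim_equal_calculate_file_metrics_py : Prop := ∀ (content : String) (ast_tree : Option (List (String × Int))), Dom_calculate_file_metrics_py content ast_tree → Spec_calculate_file_metrics_py content ast_tree (calculate_file_metrics_py content ast_tree)

-- ===== LEMMAS AND PROOFS =====

theorem countLines_alt_eq (ls : List String) (code comment blank : Int) :
    countLines_alt ls code comment blank =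
      (code + ((ls.filter (fun line =>
          PySem.Str.strip line ≠ "" ∧ ¬ (PySem.Str.startswith (PySem.Str.strip line) "#" = true))).length : Int),
       comment + ((ls.filter (fun line =>
          PySem.Str.startswith (PySem.Str.strip line) "#" = true)).length : Int),
       blank + ((ls.filter (fun line => PySem.Str.strip line = "")).length : Int)) := by
  induction ls generalizing code comment blank with
  | nil => simp [countLines_alt]
  | cons line rest ih =>
    by_cases h0 : PySem.Str.strip line = ""
    · have hnil : PySem.Chars.strip line.toList = [] := by
        simpa using congrArg String.toList h0
      have hs : PySem.Chars.startswith (PySem.Chars.strip line.toList) ['#'] = false := by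
        rw [hnil]; decide
      simp [countLines_alt, h0, hs, ih]
      ring
    · by_cases h1 : PySem.Str.startswith (PySem.Str.strip line) "#" = true
      · have h1' : PySem.Chars.startswith (PySem.Chars.strip line.toList) ['#'] = true := by
          simpa using h1
        simp [countLines_alt, h0, h1', ih]
        ring
      · have h1' : PySem.Chars.startswith (PySem.Chars.strip line.toList) ['#'] = false := by
          simpa using h1
        simp [countLines_alt, h0, h1', ih]
        ring

-- ===== VERDICT (by name: the statement is the Claim_ definition above) =====
theorem calculate_file_metrics_py_spec : Claim_equal_calculate_file_metrics_py := by
  intro content ast_tree _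
  show _ = _
  simp [calculate_file_metrics_py, calculate_file_metrics_py_alt, countLines_alt_eq]
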